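-- pv_equiv track=rewrite | github.com/sajadtorkamani/python-playground | katas/rev_sub/solution.py | rev_sub
-- ===== SOURCE A (Python) =====
-- def rev_sub(arr: list) -> list:
--     even_lists = get_even_lists(arr)
--     indices = list(even_lists.keys())
--     reversed_list = []
--     indices_changed = []
--
--     for index, num in enumerate(arr):
--         if index in indices:
--             sub_list = even_lists[index]
--             reversed_sub_list = sub_list[::-1]
--
--             reversed_list = reversed_list + reversed_sub_list
--
--             for sub_list_index in range(len(sub_list)):
--                 indices_changed.append(index + sub_list_index)
--         else:
--             if index not in indices_changed:
--                 reversed_list.append(num)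
--
--     return reversed_list
--
-- def get_even_lists(arr: list) -> dict:
--     even_lists = {}
--
--     for index, num in enumerate(arr):
--         prev_num = arr[index - 1] if index > 0 else None
--
--         is_start_of_list = is_even(num) and not is_even(prev_num)
--         is_part_of_list = is_even(num) and is_even(prev_num)
--
--         indices = list(even_lists.keys())
--         last_index = indices[-1] if len(indices) > 0 else None
--
--         if is_start_of_list:
--             even_lists[index] = [num]
--         elif is_part_of_list:
--             even_lists[last_index].append(num)
--
--     return even_lists
--
-- def is_even(num: int = None) -> bool:
--     if num is None:
--         return False
--
--     return num % 2 == 0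
-- ===== SOURCE B (Python) =====
-- def rev_sub(arr: list) -> list:
--     out = []
--     run = []
--     for x in arr:
--         if x % 2 == 0:
--             run.append(x)
--         else:
--             out.extend(reversed(run))
--             run = []
--             out.append(x)
--     out.extend(reversed(run))
--     return out
-- ===== Notes on version B (the rewrite author's own statement) =====
-- stated objective: faster
-- what changed: Replaced A's two-phase dict-of-runs construction plus index/changed-list reconstruction (with linear membership scans of the changed-index list per element) by a single linear pass that accumulates the current run of even numbers and flushes it reversed at each odd element.
import Mathlib
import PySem

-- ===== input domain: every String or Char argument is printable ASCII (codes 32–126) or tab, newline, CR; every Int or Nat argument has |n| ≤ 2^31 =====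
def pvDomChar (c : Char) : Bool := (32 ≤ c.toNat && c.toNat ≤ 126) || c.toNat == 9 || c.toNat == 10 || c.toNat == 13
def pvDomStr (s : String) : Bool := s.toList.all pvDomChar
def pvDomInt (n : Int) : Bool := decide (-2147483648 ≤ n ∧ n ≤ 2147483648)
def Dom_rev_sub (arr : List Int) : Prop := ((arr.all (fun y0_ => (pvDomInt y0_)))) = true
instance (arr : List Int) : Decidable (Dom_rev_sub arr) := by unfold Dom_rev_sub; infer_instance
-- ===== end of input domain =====

-- B replaces A's dict-of-runs + index/changed-list reconstruction by one linear pass that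
-- accumulates the current even run and flushes it reversed at each odd element.

-- ===== PORT A =====
def pvIsEven (num : Option Int) : Bool :=
  match num with
  | none => false
  | some n => PySem.Int.mod n 2 == 0

def pvGelLoop (arr : List Int) : Int → PySem.Dict Int (List Int) → List Int → PySem.Dict Int (List Int)
  | _, d, [] => d
  | index, d, num :: rest =>
      let prev_num : Option Int := if index > 0 then PySem.List.pyGet? arr (index - 1) else none
      let is_start := pvIsEven (some num) && !(pvIsEven prev_num)
      let is_part := pvIsEven (some num) && pvIsEven prev_num
      let indices := PySem.Dict.keys d
      let last_index : Option Int :=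
        if (indices.length : Int) > 0 then PySem.List.pyGet? indices (-1) else none
      let d' :=
        if is_start then PySem.Dict.insert d index [num]
        else if is_part then
          match last_index with
          | some k => PySem.Dict.modify d k [] (fun l => l ++ [num])  -- even_lists[last_index].append(num); key present here
          | none => d  -- unreachable: is_part implies the dict is nonempty (Python would raise KeyError)
        else d
      pvGelLoop arr (index + 1) d' rest

def pvGetEvenLists (arr : List Int) : PySem.Dict Int (List Int) :=
  pvGelLoop arr 0 PySem.Dict.empty arr

def pvRevLoop (even_lists : PySem.Dict Int (List Int)) (indices : List Int) :
    Int → List Int → List Int → List Int → List Int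
  | _, reversed_list, _, [] => reversed_list
  | index, reversed_list, indices_changed, num :: rest =>
      if indices.contains index then
        let sub_list := PySem.Dict.getD even_lists index []  -- even_lists[index]; key present since index ∈ indices
        let reversed_sub_list := (PySem.List.slice? sub_list none none (-1)).getD []  -- sub_list[::-1]
        let reversed_list' := reversed_list ++ reversed_sub_list
        let indices_changed' :=
          (PySem.List.pyRange 0 (sub_list.length : Int) 1).foldl
            (fun acc j => acc ++ [index + j]) indices_changed
        pvRevLoop even_lists indices (index + 1) reversed_list' indices_changed' rest
      else
        if !(indices_changed.contains index) then
          pvRevLoop even_lists indices (index + 1) (reversed_list ++ [num]) indices_changed rest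
        else
          pvRevLoop even_lists indices (index + 1) reversed_list indices_changed rest

def rev_sub (arr : List Int) : List Int :=
  let even_lists := pvGetEvenLists arr
  let indices := PySem.Dict.keys even_lists
  pvRevLoop even_lists indices 0 [] [] arr

-- ===== PORT B =====
def rev_sub_alt (arr : List Int) : List Int :=
  let s := arr.foldl
    (fun (s : List Int × List Int) x =>
      if PySem.Int.mod x 2 == 0 then (s.1, s.2 ++ [x])
      else (s.1 ++ s.2.reverse ++ [x], []))
    ([], [])
  s.1 ++ s.2.reverse

-- ===== PRECONDITION & SPEC =====
def Spec_rev_sub (arr : List Int) (out : List Int) : Prop := out = rev_sub_alt arr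
instance (arr : List Int) (out : List Int) : Decidable (Spec_rev_sub arr out) := by unfold Spec_rev_sub; infer_instance

-- ===== CLAIM (what is proved, stated in full; the proofs are below) =====
def Claim_equal_rev_sub : Prop := ∀ (arr : List Int), Dom_rev_sub arr → Spec_rev_sub arr (rev_sub arr)

-- ===== LEMMAS AND PROOFS =====

def evB (x : Int) : Bool := PySem.Int.mod x 2 == 0

-- the maximal even runs of xs, paired with their start indices (starting at i)
def runs (i : Int) : List Int → List (Int × List Int)
  | [] => []
  | x :: xs =>
    if evB x then
      (i, x :: xs.takeWhile evB) :: runs (i + 1 + (xs.takeWhile evB).length) (xs.dropWhile evB)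
    else
      runs (i + 1) xs
  termination_by xs => xs.length
  decreasing_by
  · simpa using Nat.lt_succ_of_le (List.length_dropWhile_le evB xs)
  · simp

-- assoc-list lookup with default []
def lkp : List (Int × List Int) → Int → List Int
  | [], _ => []
  | (k, v) :: t, j => if j = k then v else lkp t j

-- the common specification: reverse each maximal even run
def spec : List Int → List Int
  | [] => []
  | x :: xs =>
    if evB x then (x :: xs.takeWhile evB).reverse ++ spec (xs.dropWhile evB)
    else x :: spec xs
  termination_by xs => xs.length
  decreasing_by
  · simpa using Nat.lt_succ_of_le (List.length_dropWhile_le evB xs)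
  · simp

theorem runs_nil (i : Int) : runs i [] = [] := by rw [runs.eq_def]

theorem runs_cons_even {x : Int} (h : evB x = true) (i : Int) (xs : List Int) :
    runs i (x :: xs)
      = (i, x :: xs.takeWhile evB) :: runs (i + 1 + (xs.takeWhile evB).length) (xs.dropWhile evB) := by
  rw [runs.eq_def]; simp [h]

theorem runs_cons_odd {x : Int} (h : evB x = false) (i : Int) (xs : List Int) :
    runs i (x :: xs) = runs (i + 1) xs := by
  rw [runs.eq_def]; simp [h]

theorem spec_decompose (ys : List Int) :
    spec ys = (ys.takeWhile evB).reverse ++ spec (ys.dropWhile evB) := by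
  cases ys with
  | nil => simp [spec]
  | cons x t =>
    rw [spec]
    by_cases h : evB x = true
    · simp [h]
    · rw [List.takeWhile_cons, List.dropWhile_cons]
      simp [h, spec]

theorem runs_keys_ge (xs : List Int) (i : Int) :
    ∀ j ∈ (runs i xs).map Prod.fst, i ≤ j := by
  fun_induction runs i xs with
  | case1 i => simp
  | case2 i x xs h ih =>
    intro j hj
    simp at hj
    rcases hj with h1 | h2
    · omega
    · have h3 := ih j (by simpa using h2)
      have h4 : (0:Int) ≤ (xs.takeWhile evB).length := by positivity
      omega
  | case3 i x xs h ih =>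
    intro j hj
    have := ih j hj
    omega

theorem lkp_of_lt (rs : List (Int × List Int)) (c j : Int)
    (h : ∀ p ∈ rs, c ≤ p.1) (hj : j < c) : lkp rs j = [] := by
  induction rs with
  | nil => rfl
  | cons p t ih =>
    obtain ⟨k, v⟩ := p
    rw [lkp]
    have hk := h (k, v) (by simp)
    rw [if_neg (by simp at hk; omega)]
    exact ih (fun q hq => h q (by simp [hq]))

theorem alt_fold (xs : List Int) : ∀ (out run : List Int),
    (let s := xs.foldl
      (fun (s : List Int × List Int) x =>
        if PySem.Int.mod x 2 == 0 then (s.1, s.2 ++ [x])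
        else (s.1 ++ s.2.reverse ++ [x], [])) (out, run)
     s.1 ++ s.2.reverse)
    = out ++ (run ++ xs.takeWhile evB).reverse ++ spec (xs.dropWhile evB) := by
  induction xs with
  | nil => intro out run; simp [spec]
  | cons x t ih =>
    intro out run
    simp only [List.foldl_cons]
    by_cases h : evB x = true
    · have h2 : (PySem.Int.mod x 2 == 0) = true := h
      rw [List.takeWhile_cons, List.dropWhile_cons]
      simp only [h2, h, if_true]
      rw [ih]
      simp
    · have h2 : (PySem.Int.mod x 2 == 0) = false := by simpa [evB] using h
      rw [List.takeWhile_cons, List.dropWhile_cons]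
      simp only [h2, h, if_false, Bool.false_eq_true]
      rw [ih]
      rw [spec_decompose (x :: t)]
      rw [List.takeWhile_cons, List.dropWhile_cons]
      simp [h, spec]
      exact (spec_decompose t).symm

theorem alt_eq_spec (arr : List Int) : rev_sub_alt arr = spec arr := by
  have h := alt_fold arr [] []
  simp only [rev_sub_alt]
  rw [h, spec_decompose arr]
  simp

theorem evB_drop_tw (p : Int → Bool) : ∀ (l : List Int), l.drop (l.takeWhile p).length = l.dropWhile p := by
  intro l
  induction l with
  | nil => rfl
  | cons x t ih =>
    rw [List.takeWhile_cons, List.dropWhile_cons]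
    by_cases h : p x = true
    · simp [h, ih]
    · simp [h]

theorem get_of_drop (l t : List Int) (x : Int) (n : Nat) (h : l.drop n = x :: t) : l[n]? = some x := by
  have h2 : (l.drop n)[0]? = l[n + 0]? := List.getElem?_drop
  simp [h] at h2; exact h2.symm

theorem drop_succ (l t : List Int) (x : Int) (n : Nat) (h : l.drop n = x :: t) : l.drop (n+1) = t := by
  have h2 : l.drop (n+1) = (l.drop n).drop 1 := by rw [List.drop_drop]
  rw [h2, h]; rfl

theorem runs_key_lb {q : Int × List Int} {i : Int} {xs : List Int} (h : q ∈ runs i xs) : i ≤ q.1 :=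
  runs_keys_ge xs i q.1 (List.mem_map.mpr ⟨q, h, rfl⟩)

theorem getD_eq_nil_of_not_mem_keys (d : PySem.Dict Int (List Int)) (j : Int) (h : j ∉ d.keys) :
    d.getD j [] = [] := by
  refine PySem.Dict.getD_of_not_contains d [] ?_
  rw [Bool.eq_false_iff]
  intro hc
  exact h ((PySem.Dict.contains_iff_mem_keys d j).mp hc)

theorem pvGelLoop_cons (arr : List Int) (index : Int) (d : PySem.Dict Int (List Int)) (num : Int) (rest : List Int) :
    pvGelLoop arr index d (num :: rest) =
      pvGelLoop arr (index + 1)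
        (if pvIsEven (some num) && !(pvIsEven (if index > 0 then PySem.List.pyGet? arr (index - 1) else none)) then
          PySem.Dict.insert d index [num]
        else if pvIsEven (some num) && pvIsEven (if index > 0 then PySem.List.pyGet? arr (index - 1) else none) then
          match (if ((PySem.Dict.keys d).length : Int) > 0 then PySem.List.pyGet? (PySem.Dict.keys d) (-1) else none) with
          | some k => PySem.Dict.modify d k [] (fun l => l ++ [num])
          | none => d
        else d)
        rest := rfl

theorem gel_spec (arr : List Int) : ∀ (xs : List Int) (n : Nat) (d : PySem.Dict Int (List Int)) (p : Bool),
    xs = arr.drop n →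
    (∀ k ∈ d.keys, k < (n : Int)) →
    d.keys.Nodup →
    pvIsEven (if (n : Int) > 0 then PySem.List.pyGet? arr ((n : Int) - 1) else none) = p →
    (p = false →
      (pvGelLoop arr n d xs).keys = d.keys ++ (runs n xs).map Prod.fst
      ∧ (∀ k ∈ d.keys, (pvGelLoop arr n d xs).getD k [] = d.getD k [])
      ∧ (∀ j : Int, (n : Int) ≤ j → (pvGelLoop arr n d xs).getD j [] = lkp (runs n xs) j))
    ∧ (p = true → ∀ (s : Int) (r : List Int),
        d.keys.getLast? = some s →
        d.getD s [] = r →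
        (pvGelLoop arr n d xs).keys
          = d.keys ++ (runs ((n : Int) + (xs.takeWhile evB).length) (xs.dropWhile evB)).map Prod.fst
        ∧ (∀ k ∈ d.keys, k ≠ s → (pvGelLoop arr n d xs).getD k [] = d.getD k [])
        ∧ (pvGelLoop arr n d xs).getD s [] = r ++ xs.takeWhile evB
        ∧ (∀ j : Int, (n : Int) ≤ j →
            (pvGelLoop arr n d xs).getD j [] = lkp (runs ((n : Int) + (xs.takeWhile evB).length) (xs.dropWhile evB)) j)) := by
  intro xs
  induction xs with
  | nil =>
    intro n d p hxs hk hnd hp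
    have hgl : pvGelLoop arr n d [] = d := rfl
    have hout : ∀ j : Int, (n : Int) ≤ j → d.getD j [] = [] := by
      intro j hj
      exact getD_eq_nil_of_not_mem_keys d j (fun hmem => by have := hk j hmem; omega)
    constructor
    · intro _
      refine ⟨by simp [hgl, runs_nil], fun k _ => by rw [hgl], fun j hj => ?_⟩
      rw [hgl, hout j hj, runs_nil]; rfl
    · intro _ s r hlast hgetd
      refine ⟨by simp [hgl, runs_nil], fun k _ _ => by rw [hgl], by simp [hgl, hgetd], fun j hj => ?_⟩
      rw [hgl, hout j hj]
      simp [runs_nil, lkp]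
  | cons x rest ih =>
    intro n d p hxs hk hnd hp
    have hx : arr[n]? = some x := get_of_drop arr rest x n hxs.symm
    have hrest : rest = arr.drop (n + 1) := (drop_succ arr rest x n hxs.symm).symm
    have hcast : ((n + 1 : Nat) : Int) = (n : Int) + 1 := by push_cast; ring
    have hp' : pvIsEven (if ((n + 1 : Nat) : Int) > 0 then PySem.List.pyGet? arr (((n + 1 : Nat) : Int) - 1) else none) = evB x := by
      rw [hcast, if_pos (by omega)]
      have h1 : (n : Int) + 1 - 1 = ((n : Nat) : Int) := by omega
      rw [h1, PySem.List.pyGet?_natCast, hx]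
      rfl
    rw [pvGelLoop_cons, hp]
    by_cases he : evB x = true
    · have hev : pvIsEven (some x) = true := he
      cases p with
      | false =>
        -- fresh run starts at n
        simp only [hev, Bool.not_false, Bool.and_true, Bool.and_false, if_true]
        have hc : d.contains ((n : Int)) = false := by
          rw [Bool.eq_false_iff]; intro hcc
          have := hk _ ((PySem.Dict.contains_iff_mem_keys d _).mp hcc); omega
        have hkeys' : (PySem.Dict.insert d ((n:Int)) [x]).keys = d.keys ++ [((n:Int))] :=
          PySem.Dict.keys_insert_of_not_contains d [x] hc
        have hk' : ∀ k ∈ (PySem.Dict.insert d ((n:Int)) [x]).keys, k < ((n + 1 : Nat) : Int) := by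
          intro k hkm; rw [hkeys'] at hkm
          rcases List.mem_append.mp hkm with h1 | h2
          · have := hk k h1; omega
          · simp at h2; omega
        have hnd' : (PySem.Dict.insert d ((n:Int)) [x]).keys.Nodup :=
          PySem.Dict.nodup_keys_insert d _ _ hnd
        obtain ⟨ihkeys, ihpres, ihs, ihj⟩ :=
          (ih (n + 1) (PySem.Dict.insert d ((n:Int)) [x]) (evB x) hrest hk' hnd' hp').2 he
            ((n:Int)) [x] (by rw [hkeys']; exact List.getLast?_concat)
            (PySem.Dict.getD_insert_self d _ _ _)
        rw [hcast] at ihkeys ihpres ihs ihj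
        constructor
        · intro _
          refine ⟨?_, ?_, ?_⟩
          · rw [ihkeys, hkeys', runs_cons_even he]
            simp
          · intro k hkm
            have hne : k ≠ (n:Int) := by have := hk k hkm; omega
            rw [ihpres k (by rw [hkeys']; exact List.mem_append_left _ hkm) hne]
            exact PySem.Dict.getD_insert_of_ne d _ _ hne
          · intro j hj
            rcases eq_or_lt_of_le hj with heq | hlt
            · rw [← heq, ihs, runs_cons_even he, lkp, if_pos rfl]
              rfl
            · rw [ihj j (by omega), runs_cons_even he, lkp, if_neg (by omega)]
        · intro habs; exact absurd habs (by simp)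

      | true =>
        -- prev even, current even: run continues via modify of the last key
        simp only [hev, Bool.not_true, Bool.and_false, Bool.and_true, if_false, Bool.false_eq_true, if_true]
        constructor
        · intro habs; exact absurd habs (by simp)
        · intro _ s r hlast hgetd
          have hne0 : d.keys ≠ [] := by intro h0; rw [h0] at hlast; simp at hlast
          have hlen : ((d.keys.length : Int)) > 0 := by
            have := List.length_pos_of_ne_nil hne0; omega
          rw [if_pos hlen, PySem.List.pyGet?_neg_one, hlast]
          have hsmem : s ∈ d.keys := List.mem_of_getLast? hlast
          have hcs : d.contains s = true := (PySem.Dict.contains_iff_mem_keys d s).mpr hsmem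
          have hkeys' : (PySem.Dict.modify d s [] (fun l => l ++ [x])).keys = d.keys := by
            rw [PySem.Dict.keys_modify, PySem.Dict.keys_insert_of_contains _ _ hcs]
          have hk' : ∀ k ∈ (PySem.Dict.modify d s [] (fun l => l ++ [x])).keys, k < ((n + 1 : Nat) : Int) := by
            intro k hkm; rw [hkeys'] at hkm; have := hk k hkm; omega
          have hnd' : (PySem.Dict.modify d s [] (fun l => l ++ [x])).keys.Nodup := by rw [hkeys']; exact hnd
          obtain ⟨ihkeys, ihpres, ihs, ihj⟩ :=
            (ih (n + 1) (PySem.Dict.modify d s [] (fun l => l ++ [x])) (evB x) hrest hk' hnd' hp').2 he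
              s (r ++ [x]) (by rw [hkeys']; exact hlast)
              (by rw [PySem.Dict.getD_modify_self, hgetd])
          rw [hcast] at ihkeys ihpres ihs ihj
          have htkw : (x :: rest).takeWhile evB = x :: rest.takeWhile evB := by simp [he]
          have hdw : (x :: rest).dropWhile evB = rest.dropWhile evB := by simp [he]
          have hidx : ((n : Int) + (((x :: rest).takeWhile evB).length : Int))
              = (n : Int) + 1 + ((rest.takeWhile evB).length : Int) := by
            rw [htkw]; push_cast [List.length_cons]; ring
          refine ⟨?_, ?_, ?_, ?_⟩
          · rw [hidx, hdw, ihkeys, hkeys']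
          · intro k hkm hkne
            rw [ihpres k (by rw [hkeys']; exact hkm) hkne]
            exact PySem.Dict.getD_modify_of_ne d _ _ hkne
          · rw [ihs, htkw]; simp
          · intro j hj
            rw [hidx, hdw]
            rcases eq_or_lt_of_le hj with heq | hlt
            · rw [← heq]
              have h1 : lkp (runs ((n:Int) + 1 + ((rest.takeWhile evB).length : Int)) (rest.dropWhile evB)) ((n:Int)) = [] := by
                refine lkp_of_lt _ ((n:Int) + 1 + ((rest.takeWhile evB).length : Int)) _ (fun q hq => runs_key_lb hq) ?_
                have : (0:Int) ≤ ((rest.takeWhile evB).length : Int) := by positivity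
                omega
              rw [h1]
              refine getD_eq_nil_of_not_mem_keys _ _ ?_
              rw [ihkeys, hkeys']
              intro hmem
              rcases List.mem_append.mp hmem with h1 | h2
              · have := hk _ h1; omega
              · have := runs_keys_ge _ _ _ h2
                have h3 : (0:Int) ≤ ((rest.takeWhile evB).length : Int) := by positivity
                omega
            · rw [ihj j (by omega)]

    · have hev : pvIsEven (some x) = false := by simpa [pvIsEven, evB] using he
      -- current element odd: dict unchanged
      simp only [hev, Bool.false_and, if_false, Bool.false_eq_true]
      obtain ⟨ihkeys, ihpres, ihj⟩ :=
        (ih (n + 1) d (evB x) hrest (by intro k hkm; have := hk k hkm; omega) hnd hp').1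
          (by simpa using he)
      rw [hcast] at ihkeys ihpres ihj
      have hro : runs ((n:Int)) (x :: rest) = runs ((n:Int) + 1) rest := runs_cons_odd (by simpa using he) _ _
      have hjcl : ∀ j : Int, (n : Int) ≤ j →
          (pvGelLoop arr ((n:Int) + 1) d rest).getD j [] = lkp (runs ((n:Int) + 1) rest) j := by
        intro j hj
        rcases eq_or_lt_of_le hj with heq | hlt
        · rw [← heq]
          have h1 : lkp (runs ((n:Int) + 1) rest) ((n:Int)) = [] :=
            lkp_of_lt _ ((n:Int) + 1) _ (fun q hq => runs_key_lb hq) (by omega)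
          rw [h1]
          refine getD_eq_nil_of_not_mem_keys _ _ ?_
          rw [ihkeys]
          intro hmem
          rcases List.mem_append.mp hmem with h1 | h2
          · have := hk _ h1; omega
          · have := runs_keys_ge _ _ _ h2; omega
        · exact ihj j (by omega)
      have htkw : (x :: rest).takeWhile evB = [] := by simp [he]
      have hdw : (x :: rest).dropWhile evB = x :: rest := by simp [he]
      constructor
      · intro _
        exact ⟨by rw [ihkeys, hro], ihpres, by rw [hro]; exact hjcl⟩
      · intro _ s r hlast hgetd
        have hsmem : s ∈ d.keys := List.mem_of_getLast? hlast
        refine ⟨?_, fun k hkm _ => ihpres k hkm, ?_, ?_⟩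
        · rw [htkw, hdw]; simp [hro, ihkeys]
        · rw [htkw, ihpres s hsmem, hgetd]; simp
        · intro j hj
          rw [htkw, hdw]
          simpa [hro] using hjcl j hj



theorem spec_cons_even {x : Int} (h : evB x = true) (xs : List Int) :
    spec (x :: xs) = (x :: xs.takeWhile evB).reverse ++ spec (xs.dropWhile evB) := by
  rw [spec.eq_def]; simp [h]

theorem spec_cons_odd {x : Int} (h : evB x = false) (xs : List Int) :
    spec (x :: xs) = x :: spec xs := by
  rw [spec.eq_def]; simp [h]

theorem pvRevLoop_cons (d : PySem.Dict Int (List Int)) (K : List Int) (index : Int)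
    (out changed : List Int) (num : Int) (rest : List Int) :
    pvRevLoop d K index out changed (num :: rest) =
      if K.contains index then
        pvRevLoop d K (index + 1)
          (out ++ ((PySem.List.slice? (d.getD index []) none none (-1)).getD []))
          ((PySem.List.pyRange 0 (((d.getD index []).length : Int)) 1).foldl
            (fun acc j => acc ++ [index + j]) changed) rest
      else if !(changed.contains index) then
        pvRevLoop d K (index + 1) (out ++ [num]) changed rest
      else
        pvRevLoop d K (index + 1) out changed rest := rfl

theorem rev_loop_spec (dct : PySem.Dict Int (List Int)) (K : List Int) :
    ∀ (xs : List Int) (n c : Nat) (out changed : List Int),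
    c ≤ xs.length →
    (∀ j : Int, (n : Int) ≤ j → (K.contains j = true ↔ j ∈ (runs ((n : Int) + c) (xs.drop c)).map Prod.fst)) →
    (∀ j : Int, (n : Int) ≤ j → dct.getD j [] = lkp (runs ((n : Int) + c) (xs.drop c)) j) →
    (∀ j : Int, (n : Int) ≤ j → (changed.contains j = true ↔ j < (n : Int) + c)) →
    pvRevLoop dct K n out changed xs = out ++ spec (xs.drop c) := by
  intro xs
  induction xs with
  | nil =>
    intro n c out changed hc _ _ _
    have hc0 : c = 0 := by simpa using hc
    subst hc0
    simp [pvRevLoop, spec]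
  | cons x rest ih =>
    intro n c out changed hc HK HD HC
    have hcast : ((n + 1 : Nat) : Int) = (n : Int) + 1 := by push_cast; ring
    rw [pvRevLoop_cons]
    cases c with
    | succ c' =>
      have hcc : (((c' + 1 : Nat)) : Int) = (c' : Int) + 1 := by push_cast; ring
      have hKf : K.contains ((n : Int)) = false := by
        rw [Bool.eq_false_iff]; intro hcc2
        have hmem := (HK _ le_rfl).mp hcc2
        have := runs_keys_ge _ _ _ hmem
        have h0 : (0:Int) ≤ (c' : Int) := by positivity
        rw [hcc] at this
        omega
      have hCt : changed.contains ((n : Int)) = true := (HC _ le_rfl).mpr (by rw [hcc]; omega)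
      simp only [hKf, hCt, Bool.false_eq_true, if_false, Bool.not_true]
      have hres := ih (n + 1) c' out changed (by simpa using hc)
        (by intro j hj
            rw [hcast] at hj
            have := HK j (by omega)
            rw [hcc] at this
            have harith : ((n + 1 : Nat) : Int) + (c' : Int) = (n : Int) + ((c' : Int) + 1) := by
              rw [hcast]; ring
            rw [harith]
            exact this)
        (by intro j hj
            rw [hcast] at hj
            have := HD j (by omega)
            have harith : ((n + 1 : Nat) : Int) + (c' : Int) = (n : Int) + ((c' : Int) + 1) := by
              rw [hcast]; ring
            rw [harith]
            rw [hcc] at this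
            exact this)
        (by intro j hj
            rw [hcast] at hj
            have := HC j (by omega)
            rw [hcc] at this
            rw [hcast]
            constructor
            · intro h2; have := this.mp h2; omega
            · intro h2; exact this.mpr (by omega))
      rw [hcast] at hres
      rw [hres]
      rfl
    | zero =>
      simp only [Nat.cast_zero, add_zero, List.drop_zero] at HK HD HC ⊢
      by_cases he : evB x = true
      · have hKt : K.contains ((n : Int)) = true := by
          refine (HK _ le_rfl).mpr ?_
          rw [runs_cons_even he]
          simp
        have hsub : dct.getD ((n : Int)) [] = x :: rest.takeWhile evB := by
          rw [HD _ le_rfl, runs_cons_even he, lkp, if_pos rfl]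
        simp only [hKt, if_true, hsub]
        rw [PySem.List.slice?_none_none_neg_one, Option.getD_some,
          PySem.List.foldl_append_singleton_eq_map]
        have htw : rest.drop (rest.takeWhile evB).length = rest.dropWhile evB := evB_drop_tw evB rest
        have hres := ih (n + 1) (rest.takeWhile evB).length
          (out ++ (x :: rest.takeWhile evB).reverse)
          (changed ++ (PySem.List.pyRange 0 (((x :: rest.takeWhile evB).length : Int)) 1).map
            (fun j => (n : Int) + j))
          ((List.takeWhile_sublist evB).length_le)
          (by intro j hj
              rw [hcast] at hj
              have := HK j (by omega)
              rw [runs_cons_even he] at this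
              rw [htw]
              have harith : ((n + 1 : Nat) : Int) + ((rest.takeWhile evB).length : Int)
                  = (n : Int) + 1 + ((rest.takeWhile evB).length : Int) := by rw [hcast]
              rw [harith]
              rw [this]
              simp only [List.map_cons, List.mem_cons]
              constructor
              · intro h2; rcases h2 with h2 | h2
                · exact absurd h2 (by omega)
                · exact h2
              · intro h2; exact Or.inr h2
          )
          (by intro j hj
              rw [hcast] at hj
              have := HD j (by omega)
              rw [runs_cons_even he, lkp, if_neg (by omega)] at this
              rw [htw]
              have harith : ((n + 1 : Nat) : Int) + ((rest.takeWhile evB).length : Int)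
                  = (n : Int) + 1 + ((rest.takeWhile evB).length : Int) := by rw [hcast]
              rw [harith]
              exact this)
          (by intro j hj
              rw [hcast] at hj
              have hch := HC j (by omega)
              have harith : ((n + 1 : Nat) : Int) + ((rest.takeWhile evB).length : Int)
                  = (n : Int) + 1 + ((rest.takeWhile evB).length : Int) := by rw [hcast]
              rw [harith]
              constructor
              · intro h2
                have h3 := (List.contains_iff_mem).mp h2
                rcases List.mem_append.mp h3 with h4 | h4
                · have := hch.mp (List.contains_iff_mem.mpr h4); omega
                · obtain ⟨t, ht, rfl⟩ := List.mem_map.mp h4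
                  have := (PySem.List.mem_pyRange_one).mp ht
                  simp only [List.length_cons] at this
                  push_cast at this ⊢
                  omega
              · intro h2
                refine List.contains_iff_mem.mpr (List.mem_append.mpr (Or.inr ?_))
                refine List.mem_map.mpr ⟨j - (n : Int), ?_, by ring⟩
                refine (PySem.List.mem_pyRange_one).mpr ?_
                simp only [List.length_cons]
                push_cast
                omega)
        rw [hcast] at hres
        rw [hres, htw, spec_cons_even he]
        simp
      · have heF : evB x = false := by simpa using he
        have hKf : K.contains ((n : Int)) = false := by
          rw [Bool.eq_false_iff]; intro hcc2
          have hmem := (HK _ le_rfl).mp hcc2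
          rw [runs_cons_odd heF] at hmem
          have := runs_keys_ge _ _ _ hmem
          omega
        have hCf : changed.contains ((n : Int)) = false := by
          rw [Bool.eq_false_iff]; intro hcc2
          have := (HC _ le_rfl).mp hcc2; omega
        simp only [hKf, hCf, Bool.false_eq_true, if_false, Bool.not_false, if_true]
        have hres := ih (n + 1) 0 (out ++ [x]) changed (by omega)
          (by intro j hj
              rw [hcast] at hj
              have := HK j (by omega)
              rw [runs_cons_odd heF] at this
              simpa [hcast] using this)
          (by intro j hj
              rw [hcast] at hj
              have := HD j (by omega)
              rw [runs_cons_odd heF] at this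
              simpa [hcast] using this)
          (by intro j hj
              rw [hcast] at hj
              have := HC j (by omega)
              constructor
              · intro h2; have := this.mp h2; omega
              · intro h2; exact this.mpr (by omega))
        rw [hcast] at hres
        simp only [List.drop_zero] at hres
        rw [hres, spec_cons_odd heF]
        simp


theorem rev_sub_eq_spec (arr : List Int) : rev_sub arr = spec arr := by
  have hp0 : pvIsEven (if ((0 : Nat) : Int) > 0 then PySem.List.pyGet? arr (((0 : Nat) : Int) - 1) else none) = false := by
    norm_num [pvIsEven]
  obtain ⟨hkeys, -, hj⟩ :=
    (gel_spec arr arr 0 PySem.Dict.empty false (by simp) (by simp [PySem.Dict.keys_empty])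
      (by simp [PySem.Dict.keys_empty]) hp0).1 rfl
  simp only [Nat.cast_zero, PySem.Dict.keys_empty, List.nil_append] at hkeys hj
  have hmain := rev_loop_spec (pvGetEvenLists arr) ((pvGetEvenLists arr).keys) arr 0 0 [] []
    (by omega)
    (by intro j hj2
        simp only [Nat.cast_zero, add_zero, List.drop_zero]
        rw [List.contains_iff_mem]
        show j ∈ (pvGetEvenLists arr).keys ↔ _
        rw [show pvGetEvenLists arr = pvGelLoop arr 0 PySem.Dict.empty arr from rfl, hkeys])
    (by intro j hj2
        simp only [Nat.cast_zero, add_zero, List.drop_zero]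
        exact hj j hj2)
    (by intro j hj2
        simp only [Nat.cast_zero, add_zero]
        constructor
        · intro h2; simp at h2
        · intro h2; omega)
  simp only [Nat.cast_zero, List.nil_append] at hmain
  exact hmain

-- ===== VERDICT (by name: the statement is the Claim_ definition above) =====
theorem rev_sub_spec : Claim_equal_rev_sub := by
  intro arr _
  unfold Spec_rev_sub
  rw [rev_sub_eq_spec, alt_eq_spec]
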